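-- pv_equiv track=rewrite | github.com/Davidwinberg/laboration | lab04/weather_functions.py | when_is_spring
-- ===== SOURCE A (Python) =====
-- def when_is_spring(list):
--     dagar_i_rad = 0
--     index = -1
--     if len(list) == 0 or sum(list) == 0:
--         return index
--
--     start = 0
--     for x in list:
--
--         index += 1
--
--
--         if x > 0 and dagar_i_rad == 0:
--             dagar_i_rad += 1
--             start = index
--         elif x > 0:
--             dagar_i_rad += 1
--         elif x <= 0:
--             start = 0
--             dagar_i_rad = 0
--         else:
--             dagar_i_rad = 0
--
--
--         if dagar_i_rad == 7:
--             return start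
-- ===== SOURCE B (Python) =====
-- def when_is_spring(list):
--     if len(list) == 0 or sum(list) == 0:
--         return -1
--     for i in range(len(list) - 6):
--         if all(x > 0 for x in list[i:i + 7]):
--             return i
--     return None
-- ===== Notes on version B (the rewrite author's own statement) =====
-- stated objective: alternative
-- what changed: Replaced A's single-pass incremental run counter (with start/index bookkeeping) by a windowed scan that tests each index i with all(x > 0 for x in list[i:i+7]), keeping A's empty/zero-sum guard.
import Mathlib
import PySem

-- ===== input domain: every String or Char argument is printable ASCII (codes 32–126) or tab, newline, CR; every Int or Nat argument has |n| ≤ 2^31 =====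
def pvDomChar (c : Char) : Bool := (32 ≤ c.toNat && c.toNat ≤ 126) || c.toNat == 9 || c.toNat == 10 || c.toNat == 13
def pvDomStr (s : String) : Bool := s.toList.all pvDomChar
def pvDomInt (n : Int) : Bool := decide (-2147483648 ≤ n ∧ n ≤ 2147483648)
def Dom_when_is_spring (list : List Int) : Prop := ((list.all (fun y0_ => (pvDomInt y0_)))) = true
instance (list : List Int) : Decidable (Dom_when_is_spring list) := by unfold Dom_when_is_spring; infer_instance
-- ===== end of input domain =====

-- B replaces A's incremental run counter by a windowed scan over start indices (same guard, same results); alternative decomposition, not claimed faster.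

-- ===== PORT A =====
-- the for-loop of A: state (dagar_i_rad, index, start), early return on dagar_i_rad == 7
def aLoop : List Int → Int → Int → Int → Option Int
  | [], _, _, _ => none
  | x :: xs, dagar, index, start =>
    let index := index + 1
    let p : Int × Int :=
      if 0 < x ∧ dagar = 0 then (dagar + 1, index)
      else if 0 < x then (dagar + 1, start)
      else if x ≤ 0 then (0, 0)
      else (0, start)
    if p.1 = 7 then some p.2 else aLoop xs p.1 index p.2

def when_is_spring (list : List Int) : Option Int :=
  if list.length = 0 ∨ list.sum = 0 then some (-1)
  else aLoop list 0 (-1) 0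

-- ===== PORT B =====
-- the for-loop of B: scan the indices i of range(len(list)-6), testing all(x > 0 for x in list[i:i+7])
def bScan (list : List Int) : List Int → Option Int
  | [] => none
  | i :: rest =>
    if (PySem.List.slice list (some i) (some (i + 7))).all (fun x => decide (0 < x)) then some i
    else bScan list rest

def when_is_spring_alt (list : List Int) : Option Int :=
  if list.length = 0 ∨ list.sum = 0 then some (-1)
  else bScan list (PySem.List.pyRange 0 ((list.length : Int) - 6) 1)

-- ===== PRECONDITION & SPEC =====
def Spec_when_is_spring (list : List Int) (out : Option Int) : Prop := out = when_is_spring_alt list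
instance (list : List Int) (out : Option Int) : Decidable (Spec_when_is_spring list out) := by unfold Spec_when_is_spring; infer_instance

-- ===== CLAIM (what is proved, stated in full; the proofs are below) =====
def Claim_equal_when_is_spring : Prop := ∀ (list : List Int), Dom_when_is_spring list → Spec_when_is_spring list (when_is_spring list)

-- ===== LEMMAS AND PROOFS =====

/-- positivity mask of the input -/
def pvMask (xs : List Int) : List Bool := xs.map (fun x => decide (0 < x))

/-- a 7-window of `true`s starts at the head -/
def pvWin (bs : List Bool) : Bool := decide (7 ≤ bs.length) && (bs.take 7).all id

/-- index of the first 7-window of `true`s -/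
def pvFirstRun : List Bool → Option Nat
  | [] => none
  | b :: bs => if pvWin (b :: bs) then some 0 else (pvFirstRun bs).map (· + 1)

lemma pvFirstRun_short (bs : List Bool) (h : bs.length < 7) : pvFirstRun bs = none := by
  induction bs with
  | nil => rfl
  | cons b t ih =>
    simp only [List.length_cons] at h
    have hw : pvWin (b :: t) = false := by
      unfold pvWin
      rw [decide_eq_false (by simp only [List.length_cons]; omega)]
      simp
    simp [pvFirstRun, hw, ih (by omega)]

lemma pv_take_all_false : ∀ (k n : Nat) (bs : List Bool), k < n →
    (((List.replicate k true ++ false :: bs).take n).all id) = false := by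
  intro k
  induction k with
  | zero =>
    intro n bs h
    obtain ⟨m, rfl⟩ : ∃ m, n = m + 1 := ⟨n - 1, by omega⟩
    simp
  | succ k ih =>
    intro n bs h
    obtain ⟨m, rfl⟩ : ∃ m, n = m + 1 := ⟨n - 1, by omega⟩
    simp only [List.replicate_succ, List.cons_append, List.take_succ_cons, List.all_cons]
    simp [ih m bs (by omega)]

lemma pvWin_pad_false (d : Nat) (hd : d < 7) (bs : List Bool) :
    pvWin (List.replicate d true ++ false :: bs) = false := by
  simp only [pvWin, pv_take_all_false d 7 bs hd, Bool.and_false]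

lemma pvFirstRun_pad_false : ∀ (d : Nat), d < 7 → ∀ (bs : List Bool),
    pvFirstRun (List.replicate d true ++ false :: bs) = (pvFirstRun bs).map (· + (d + 1)) := by
  intro d
  induction d with
  | zero =>
    intro _ bs
    have h0 : pvWin (false :: bs) = false := by simpa using pvWin_pad_false 0 (by omega) bs
    simp [pvFirstRun, h0]
  | succ d ih =>
    intro hd bs
    simp only [List.replicate_succ, List.cons_append, pvFirstRun]
    have hw : pvWin (true :: (List.replicate d true ++ false :: bs)) = false := by
      have := pvWin_pad_false (d + 1) hd bs
      simpa [List.replicate_succ] using this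
    rw [hw]
    simp only [Bool.false_eq_true, if_false, ih (by omega) bs, Option.map_map]
    cases pvFirstRun bs <;> simp [Function.comp] <;> omega

lemma pvFirstRun_seven (bs : List Bool) :
    pvFirstRun (List.replicate 7 true ++ bs) = some 0 := by
  have hw : pvWin (List.replicate 7 true ++ bs) = true := by
    simp [pvWin, List.take_append_of_le_length (by simp : 7 ≤ (List.replicate 7 true).length)]
  cases hM : List.replicate 7 true ++ bs with
  | nil => simp at hM
  | cons b t => rw [pvFirstRun, ← hM, hw]; simp

lemma aLoop_eq : ∀ (xs : List Int) (d : Nat) (idx st : Int), d ≤ 6 → (d ≠ 0 → st = idx + 1 - d) →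
    aLoop xs (d : Int) idx st
      = (pvFirstRun (List.replicate d true ++ pvMask xs)).map (fun i => idx + 1 - (d : Int) + (i : Int)) := by
  intro xs
  induction xs with
  | nil =>
    intro d idx st hd _
    rw [pvFirstRun_short _ (by simp [pvMask]; omega)]
    rfl
  | cons x t ih =>
    intro d idx st hd hst
    by_cases hx : 0 < x
    · have hmask : pvMask (x :: t) = true :: pvMask t := by simp [pvMask, hx]
      by_cases hd0 : d = 0
      · subst hd0
        have step : aLoop (x :: t) ((0 : Nat) : Int) idx st = aLoop t 1 (idx + 1) (idx + 1) := by
          simp [aLoop, hx]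
        have hrec := ih 1 (idx + 1) (idx + 1) (by omega) (by intro _; push_cast; ring)
        simp only [Nat.cast_one] at hrec
        rw [step, hrec, hmask]
        simp only [List.replicate_zero, List.nil_append,
          show List.replicate 1 true ++ pvMask t = true :: pvMask t by simp]
        cases pvFirstRun (true :: pvMask t) <;> simp <;> omega
      · have hstv := hst hd0
        have hrep : List.replicate d true ++ true :: pvMask t
            = List.replicate (d + 1) true ++ pvMask t := by
          rw [List.replicate_succ' (n := d)]; simp
        by_cases hd6 : d = 6
        · subst hd6
          have hc : ((6 : Nat) : Int) = 6 := by norm_num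
          have step : aLoop (x :: t) ((6 : Nat) : Int) idx st = some st := by
            rw [hc]
            simp [aLoop, hx]
          rw [step, hmask, hrep,
            show List.replicate (6 + 1) true ++ pvMask t = List.replicate 7 true ++ pvMask t from rfl,
            pvFirstRun_seven]
          rw [hstv, hc]
          simp
        · have step : aLoop (x :: t) ((d : Nat) : Int) idx st
              = aLoop t ((d : Int) + 1) (idx + 1) st := by
            simp only [aLoop]
            have h1 : ¬ (0 < x ∧ ((d : Nat) : Int) = 0) := by
              rintro ⟨_, h⟩; exact hd0 (by exact_mod_cast h)
            rw [if_neg h1, if_pos hx]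
            have h7 : ¬ ((d : Int) + 1 = 7) := by intro h; apply hd6; omega
            simp [h7]
          have hrec := ih (d + 1) (idx + 1) st (by omega) (by intro _; push_cast; omega)
          rw [show (((d + 1 : Nat)) : Int) = (d : Int) + 1 by push_cast; ring] at hrec
          rw [step, hrec, hmask, hrep]
          cases pvFirstRun (List.replicate (d + 1) true ++ pvMask t) <;> simp <;> (push_cast; ring)
    · have hx' : x ≤ 0 := by omega
      have hmask : pvMask (x :: t) = false :: pvMask t := by simp [pvMask, hx]
      have step : aLoop (x :: t) ((d : Nat) : Int) idx st = aLoop t 0 (idx + 1) 0 := by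
        simp [aLoop, hx, hx']
      have hrec := ih 0 (idx + 1) 0 (by omega) (by intro h; exact absurd rfl h)
      simp only [Nat.cast_zero, List.replicate_zero, List.nil_append] at hrec
      rw [step, hrec, hmask, pvFirstRun_pad_false d (by omega) (pvMask t)]
      cases pvFirstRun (pvMask t) <;> simp <;> (push_cast; ring)

lemma pvWin_drop (L : List Int) (k : Nat) (hk : k + 7 ≤ L.length) :
    pvWin (pvMask (L.drop k)) = ((L.drop k).take 7).all (fun x => decide (0 < x)) := by
  simp only [pvWin, pvMask, ← List.map_take, List.all_map, List.length_map]
  have h7 : (7 ≤ (L.drop k).length) := by simp; omega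
  rw [decide_eq_true h7]
  simp [Function.comp]

lemma bScan_eq (L : List Int) : ∀ (m k : Nat), L.length - k ≤ m →
    bScan L (PySem.List.pyRange (k : Int) ((L.length : Int) - 6) 1)
      = (pvFirstRun (pvMask (L.drop k))).map (fun i => (k : Int) + (i : Int)) := by
  intro m
  induction m with
  | zero =>
    intro k hm
    rw [PySem.List.pyRange_one_eq_nil (by omega), pvFirstRun_short _ (by simp [pvMask]; omega)]
    rfl
  | succ m ih =>
    intro k hm
    by_cases h : ((L.length : Int) - 6) ≤ (k : Int)
    · rw [PySem.List.pyRange_one_eq_nil h, pvFirstRun_short _ (by simp [pvMask]; omega)]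
      rfl
    · have hk7 : k + 7 ≤ L.length := by omega
      rw [PySem.List.pyRange_one_cons (by omega)]
      simp only [bScan]
      rw [show ((k : Int) + 7) = ((k : Int) + ((7 : Nat) : Int)) by norm_num,
        PySem.List.slice_natCast_add]
      have hdrop : L.drop k = L[k] :: L.drop (k + 1) :=
        List.drop_eq_getElem_cons (by omega)
      have hwin := pvWin_drop L k hk7
      have hfr : pvFirstRun (pvMask (L.drop k))
          = if pvWin (pvMask (L.drop k)) then some 0
            else (pvFirstRun (pvMask (L.drop (k + 1)))).map (· + 1) := by
        conv_lhs => rw [hdrop]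
        rw [show pvMask (L[k] :: L.drop (k + 1)) = decide (0 < L[k]) :: pvMask (L.drop (k + 1))
          from rfl, pvFirstRun]
        rw [show (decide (0 < L[k]) :: pvMask (L.drop (k + 1))) = pvMask (L.drop k) by
          rw [hdrop]; rfl]
      by_cases hall : ((L.drop k).take 7).all (fun x => decide (0 < x)) = true
      · rw [if_pos hall, hfr, hwin, if_pos hall]
        simp
      · rw [if_neg hall, hfr, hwin, if_neg hall]
        have hrec := ih (k + 1) (by omega)
        rw [show (((k + 1 : Nat)) : Int) = (k : Int) + 1 by push_cast; ring] at hrec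
        rw [hrec]
        cases pvFirstRun (pvMask (L.drop (k + 1))) <;> simp <;> (push_cast; ring)

-- ===== VERDICT (by name: the statement is the Claim_ definition above) =====
theorem when_is_spring_spec : Claim_equal_when_is_spring := by
  intro L _
  unfold Spec_when_is_spring when_is_spring when_is_spring_alt
  by_cases hg : L.length = 0 ∨ L.sum = 0
  · rw [if_pos hg, if_pos hg]
  · rw [if_neg hg, if_neg hg]
    have hb := bScan_eq L L.length 0 (by omega)
    have ha := aLoop_eq L 0 (-1) 0 (by omega) (by intro h; exact absurd rfl h)
    simp only [Nat.cast_zero, List.drop_zero, List.replicate_zero, List.nil_append] at hb ha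
    rw [ha, hb]
    cases pvFirstRun (pvMask L) <;> simp <;> omega
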